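-- pv_equiv track=rewrite | github.com/parallelno/guimos_jdundel | scripts/export/export_sprite.py | find_leftest_bit
-- ===== SOURCE A (Python) =====
-- def find_leftest_bit(bits, w, h, enabled):
-- 	dx = w
-- 	for y in range(h):
-- 		for x in range(w):
-- 			b = bits[y*w + x]
-- 			if b == enabled and x < dx:
-- 				dx = x
-- 				break
-- 	return dx
-- ===== SOURCE B (Python) =====
-- def find_leftest_bit(bits, w, h, enabled):
--     if h > 0:
--         for x in range(w):
--             for y in range(h):
--                 if bits[y*w + x] == enabled:
--                     return x
--     return w
-- ===== Notes on version B (the rewrite author's own statement) =====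
-- stated objective: simpler
-- what changed: B scans column-major (outer loop over x, inner over y) and returns the first column containing an enabled bit, eliminating A's row-major scan with its dx min-tracking accumulator and per-row break.
-- outside the precondition, e.g. on find_leftest_bit([1], 2, 1, 1): A returns 0, B returns 0
import Mathlib
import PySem

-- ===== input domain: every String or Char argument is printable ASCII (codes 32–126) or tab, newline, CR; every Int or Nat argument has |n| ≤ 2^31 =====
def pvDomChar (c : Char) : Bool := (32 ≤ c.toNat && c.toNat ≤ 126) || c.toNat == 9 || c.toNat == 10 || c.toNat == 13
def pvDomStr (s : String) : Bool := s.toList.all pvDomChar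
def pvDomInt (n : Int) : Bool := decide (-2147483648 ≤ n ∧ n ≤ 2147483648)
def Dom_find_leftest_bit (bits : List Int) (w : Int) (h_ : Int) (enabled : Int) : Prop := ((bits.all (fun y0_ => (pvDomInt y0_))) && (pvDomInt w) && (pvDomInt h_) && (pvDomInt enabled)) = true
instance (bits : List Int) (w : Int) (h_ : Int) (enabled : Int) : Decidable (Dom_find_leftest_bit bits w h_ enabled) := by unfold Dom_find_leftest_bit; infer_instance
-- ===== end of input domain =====

-- B scans column-major with an immediate return at the first column containing an enabled
-- bit (objective: simpler — no min-tracking accumulator), equal to A's row-major min scan.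


-- ===== PORT A =====
-- inner 'for x in range(w)' with its break: returns the new dx
def flA_inner (bits : List Int) (w enabled y : Int) (xs : List Int) (dx : Int) : Int :=
  match xs with
  | [] => dx
  | x :: rest =>
    let b := (PySem.List.pyGet? bits (y * w + x)).getD 0
    if b = enabled ∧ x < dx then x
    else flA_inner bits w enabled y rest dx

def find_leftest_bit (bits : List Int) (w : Int) (h_ : Int) (enabled : Int) : Int :=
  (PySem.List.pyRange 0 h_ 1).foldl
    (fun dx y => flA_inner bits w enabled y (PySem.List.pyRange 0 w 1) dx) w

-- ===== PORT B =====
-- inner 'for y in range(h)': does column x contain an enabled bit?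
def flB_col (bits : List Int) (w enabled x : Int) (ys : List Int) : Bool :=
  match ys with
  | [] => false
  | y :: rest =>
    if (PySem.List.pyGet? bits (y * w + x)).getD 0 = enabled then true
    else flB_col bits w enabled x rest

-- outer 'for x in range(w)' with the early return
def flB_outer (bits : List Int) (w h_ enabled : Int) (xs : List Int) : Int :=
  match xs with
  | [] => w
  | x :: rest =>
    if flB_col bits w enabled x (PySem.List.pyRange 0 h_ 1) then x
    else flB_outer bits w h_ enabled rest

def find_leftest_bit_alt (bits : List Int) (w : Int) (h_ : Int) (enabled : Int) : Int :=
  if 0 < h_ then flB_outer bits w h_ enabled (PySem.List.pyRange 0 w 1) else w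

-- ===== PRECONDITION & SPEC =====
-- Pre_ excludes bit buffers shorter than w*h (for positive w,h): there Python A (and B)
-- indexes past the end and raises IndexError on almost all such inputs.
def Pre_find_leftest_bit (bits : List Int) (w : Int) (h_ : Int) (enabled : Int) : Prop :=
  0 < w → 0 < h_ → w * h_ ≤ (bits.length : Int)
instance (bits : List Int) (w : Int) (h_ : Int) (enabled : Int) : Decidable (Pre_find_leftest_bit bits w h_ enabled) := by unfold Pre_find_leftest_bit; infer_instance
def pvWitness_find_leftest_bit : List Int × Int × Int × Int := ([0, 1, 0, 0, 1, 0], 3, 2, 1)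
def Spec_find_leftest_bit (bits : List Int) (w : Int) (h_ : Int) (enabled : Int) (out : Int) : Prop := out = find_leftest_bit_alt bits w h_ enabled
instance (bits : List Int) (w : Int) (h_ : Int) (enabled : Int) (out : Int) : Decidable (Spec_find_leftest_bit bits w h_ enabled out) := by unfold Spec_find_leftest_bit; infer_instance

-- ===== CLAIM (what is proved, stated in full; the proofs are below) =====
def Claim_equal_find_leftest_bit : Prop := ∀ (bits : List Int) (w : Int) (h_ : Int) (enabled : Int), Dom_find_leftest_bit bits w h_ enabled → Pre_find_leftest_bit bits w h_ enabled → Spec_find_leftest_bit bits w h_ enabled (find_leftest_bit bits w h_ enabled)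

-- ===== LEMMAS AND PROOFS =====

-- abbreviation used only in the proofs
def flQ (bits : List Int) (w enabled y x : Int) : Bool :=
  decide ((PySem.List.pyGet? bits (y * w + x)).getD 0 = enabled)

-- A's inner loop leaves dx unchanged when every x in the list is ≥ dx
theorem flA_inner_stuck (bits : List Int) (w enabled y : Int) (xs : List Int) (dx : Int)
    (h : ∀ x ∈ xs, dx ≤ x) : flA_inner bits w enabled y xs dx = dx := by
  induction xs with
  | nil => rfl
  | cons x rest ih =>
    simp only [flA_inner]
    have hx := h x (List.mem_cons_self)
    rw [if_neg (by push_neg; omega)]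
    exact ih (fun x hx => h x (List.mem_cons_of_mem _ hx))

-- A's inner loop on a sorted row computes min dx (first enabled x, default treated via dx)
theorem flA_inner_find (bits : List Int) (w enabled y : Int) (xs : List Int) (dx : Int)
    (hs : xs.Pairwise (· ≤ ·)) :
    flA_inner bits w enabled y xs dx =
      match xs.find? (flQ bits w enabled y) with
      | none => dx
      | some x => min dx x := by
  induction xs with
  | nil => rfl
  | cons x rest ih =>
    have hs' := (List.pairwise_cons.mp hs).2
    have hle := (List.pairwise_cons.mp hs).1
    rw [List.find?_cons]
    by_cases hq : flQ bits w enabled y x = true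
    · have hqe : (PySem.List.pyGet? bits (y * w + x)).getD 0 = enabled := by
        simpa [flQ] using hq
      simp only [flA_inner, hq]
      by_cases hxd : x < dx
      · rw [if_pos ⟨hqe, hxd⟩, min_def]; split_ifs <;> omega
      · rw [if_neg (by push_neg; intro _; omega)]
        rw [flA_inner_stuck bits w enabled y rest dx
          (fun z hz => by have := hle z hz; omega)]
        rw [min_def]; split_ifs <;> omega
    · have hqe : ¬ (PySem.List.pyGet? bits (y * w + x)).getD 0 = enabled := by
        simpa [flQ] using hq
      simp only [flA_inner, Bool.of_not_eq_true hq]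
      rw [if_neg (by intro hc; exact hqe hc.1)]
      exact ih hs'

-- B's column test is List.any
theorem flB_col_any (bits : List Int) (w enabled x : Int) (ys : List Int) :
    flB_col bits w enabled x ys = ys.any (fun y => flQ bits w enabled y x) := by
  induction ys with
  | nil => rfl
  | cons y rest ih =>
    simp only [flB_col, List.any_cons, flQ]
    by_cases h : (PySem.List.pyGet? bits (y * w + x)).getD 0 = enabled
    · simp [h]
    · simp [h, ih, flQ]

-- B's outer loop is find?-with-default
theorem flB_outer_find (bits : List Int) (w h_ enabled : Int) (xs : List Int) :
    flB_outer bits w h_ enabled xs =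
      (xs.find? (fun x => flB_col bits w enabled x (PySem.List.pyRange 0 h_ 1))).getD w := by
  induction xs with
  | nil => rfl
  | cons x rest ih =>
    simp only [flB_outer, List.find?]
    by_cases h : flB_col bits w enabled x (PySem.List.pyRange 0 h_ 1) = true
    · simp [h]
    · simp [h, ih]

-- on a sorted list, find? returns an element ≤ any satisfying element
theorem find?_le_of_sorted (p : Int → Bool) (l : List Int) (hs : l.Pairwise (· ≤ ·))
    (x : Int) (hx : x ∈ l) (hp : p x = true) :
    ∃ x', l.find? p = some x' ∧ x' ≤ x := by
  induction l with
  | nil => cases hx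
  | cons a rest ih =>
    have hs' := (List.pairwise_cons.mp hs).2
    have hle := (List.pairwise_cons.mp hs).1
    by_cases ha : p a = true
    · refine ⟨a, by simp [List.find?, ha], ?_⟩
      rcases List.mem_cons.mp hx with h | h
      · omega
      · exact hle x h
    · have hxr : x ∈ rest := by
        rcases List.mem_cons.mp hx with h | h
        · subst h; exact absurd hp ha
        · exact h
      obtain ⟨x', h1, h2⟩ := ih hs' hxr
      exact ⟨x', by simp [List.find?, ha, h1], h2⟩

-- foldl of min: bounds and attainment
theorem foldl_min_facts (l : List Int) (f : Int → Int) (a : Int) :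
    (l.foldl (fun d y => min d (f y)) a ≤ a) ∧
    (∀ y ∈ l, l.foldl (fun d y => min d (f y)) a ≤ f y) ∧
    (l.foldl (fun d y => min d (f y)) a = a ∨
      ∃ y ∈ l, l.foldl (fun d y => min d (f y)) a = f y) := by
  induction l generalizing a with
  | nil => simp
  | cons b rest ih =>
    obtain ⟨h1, h2, h3⟩ := ih (min a (f b))
    refine ⟨by simpa using le_trans h1 (by omega), ?_, ?_⟩
    · intro y hy
      rcases List.mem_cons.mp hy with h | h
      · subst h; simpa using le_trans h1 (by omega)
      · simpa using h2 y h
    · rcases h3 with h | ⟨y, hy, h⟩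
      · rcases le_or_gt a (f b) with hab | hab
        · left; simp only [List.foldl_cons]; omega
        · right; exact ⟨b, List.mem_cons_self, by simp only [List.foldl_cons]; omega⟩
      · right; exact ⟨y, List.mem_cons_of_mem _ hy, by simpa using h⟩

-- the per-row "first enabled x, default w"
def flF (bits : List Int) (w h_ enabled y : Int) : Int :=
  ((PySem.List.pyRange 0 w 1).find? (flQ bits w enabled y)).getD w

-- A's fold equals a fold of min flF (every accumulator value stays ≤ w)
theorem foldA_eq_foldmin (bits : List Int) (w h_ enabled : Int) (l : List Int) (a : Int)
    (ha : a ≤ w) :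
    l.foldl (fun dx y => flA_inner bits w enabled y (PySem.List.pyRange 0 w 1) dx) a
      = l.foldl (fun d y => min d (flF bits w h_ enabled y)) a := by
  induction l generalizing a with
  | nil => rfl
  | cons y rest ih =>
    have hsort : (PySem.List.pyRange 0 w 1).Pairwise (· ≤ ·) :=
      (PySem.List.pairwise_lt_pyRange_one 0 w).imp (fun h => le_of_lt h)
    simp only [List.foldl_cons]
    rw [flA_inner_find bits w enabled y _ a hsort]
    cases hf : (PySem.List.pyRange 0 w 1).find? (flQ bits w enabled y) with
    | none =>
      have hFe : flF bits w h_ enabled y = w := by simp [flF, hf]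
      simp only [hFe, min_eq_left ha]
      exact ih a ha
    | some x =>
      have hFe : flF bits w h_ enabled y = x := by simp [flF, hf]
      simp only [hFe]
      exact ih _ (le_trans (min_le_left a x) ha)

-- main equivalence
theorem fl_main (bits : List Int) (w h_ enabled : Int) :
    find_leftest_bit bits w h_ enabled = find_leftest_bit_alt bits w h_ enabled := by
  have hsort : (PySem.List.pyRange 0 w 1).Pairwise (· ≤ ·) :=
    (PySem.List.pairwise_lt_pyRange_one 0 w).imp (fun h => le_of_lt h)
  -- rewrite both sides
  unfold find_leftest_bit find_leftest_bit_alt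
  by_cases hh : 0 < h_
  case neg =>
    rw [if_neg hh,
      show PySem.List.pyRange 0 h_ 1 = [] from PySem.List.pyRange_one_eq_nil (by omega)]
    rfl
  rw [if_pos hh, foldA_eq_foldmin bits w h_ enabled _ w le_rfl,
      flB_outer_find]
  set R := PySem.List.pyRange 0 h_ 1 with hR
  set C := PySem.List.pyRange 0 w 1 with hC
  set P : Int → Bool := fun x => flB_col bits w enabled x R with hP
  have hPany : ∀ x, P x = R.any (fun y => flQ bits w enabled y x) := by
    intro x; exact flB_col_any bits w enabled x R
  set N := R.foldl (fun d y => min d (flF bits w h_ enabled y)) w with hN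
  obtain ⟨hNw, hNle, hNeq⟩ := foldl_min_facts R (flF bits w h_ enabled) w
  rw [← hN] at hNw hNle hNeq
  have hMw : (C.find? P).getD w ≤ w := by
    cases hfp : C.find? P with
    | none => simp
    | some x =>
      have hx : x ∈ C := List.mem_of_find?_eq_some hfp
      have := (PySem.List.mem_pyRange_one).mp (hC ▸ hx)
      simp; omega
  refine le_antisymm ?_ ?_
  · -- N ≤ M
    cases hfp : C.find? P with
    | none => simpa using hNw
    | some x =>
      have hx : x ∈ C := List.mem_of_find?_eq_some hfp
      have hpx : P x = true := List.find?_some hfp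
      rw [hPany] at hpx
      obtain ⟨y, hy, hq⟩ := List.any_eq_true.mp hpx
      -- row y has an enabled bit at column x, so flF y ≤ x
      obtain ⟨x', hfind, hle'⟩ := find?_le_of_sorted (flQ bits w enabled y) C hsort x hx hq
      have hF : flF bits w h_ enabled y ≤ x := by
        simp [flF, ← hC, hfind]; omega
      have := hNle y hy
      simp; omega
  · -- M ≤ N
    rcases hNeq with h | ⟨y, hy, h⟩
    · rw [h]; exact hMw
    · rw [h]
      cases hfind : C.find? (flQ bits w enabled y) with
      | none =>
        have : flF bits w h_ enabled y = w := by simp [flF, ← hC, hfind]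
        rw [this]; exact hMw
      | some x0 =>
        have hF : flF bits w h_ enabled y = x0 := by simp [flF, ← hC, hfind]
        rw [hF]
        have hx0 : x0 ∈ C := List.mem_of_find?_eq_some hfind
        have hq : flQ bits w enabled y x0 = true := List.find?_some hfind
        have hpx0 : P x0 = true := by
          rw [hPany]; exact List.any_eq_true.mpr ⟨y, hy, hq⟩
        obtain ⟨x', h1, h2⟩ := find?_le_of_sorted P C hsort x0 hx0 hpx0
        simp [h1]; omega

-- ===== VERDICT (by name: the statement is the Claim_ definition above) =====
theorem find_leftest_bit_spec : Claim_equal_find_leftest_bit := by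
  intro bits w h_ enabled _ _
  unfold Spec_find_leftest_bit
  exact fl_main bits w h_ enabled
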